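-- pv_equiv track=rewrite | github.com/sayaib/coding-checker-model | DEV/project/rule_checker/rule_56_ladder_utils.py | build_chains
-- ===== SOURCE A (Python) =====
-- def build_chains(data):
--     # Step 1: Build a map from outputs to list of dicts that consume them
--     index_map = {i: d for i, d in enumerate(data)}
--     chains = []
--
--     # Step 2: For each dict, attempt to build a chain forward
--     def dfs(path, visited):
--         last = path[-1]
--         extended = False
--
--         for i, candidate in index_map.items():
--             if i in visited:
--                 continue
--             # Check for overlap between last out_list and candidate in_list
--
--             out_list_present=last.get('out_list', [])
--             in_list_present=candidate.get('in_list', [])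
--
--
--             if set(out_list_present) & set(in_list_present):
--                 dfs(path + [candidate], visited | {i})
--                 extended = True
--
--         if not extended:
--             chains.append(path)
--
--     # Step 3: Start chains from each dictionary
--     for i in range(len(data)):
--         dfs([data[i]], {i})
--
--     return chains
-- ===== SOURCE B (Python) =====
-- def build_chains(data):
--     n = len(data)
--     # Inverted index: value -> ascending list of indices whose in_list contains it.
--     consumers = {}
--     for j, d in enumerate(data):
--         for x in d.get('in_list', []):
--             consumers.setdefault(x, []).append(j)
--     # Overlap successors of each dict, in ascending index order.
--     adj = [sorted({j for x in d.get('out_list', []) for j in consumers.get(x, [])})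
--            for d in data]
--     chains = []
--     # Iterative depth-first enumeration with an explicit stack of index paths.
--     for i in range(n):
--         stack = [([i], {i})]
--         while stack:
--             path, visited = stack.pop()
--             nbrs = [j for j in adj[path[-1]] if j not in visited]
--             if not nbrs:
--                 chains.append([data[k] for k in path])
--             else:
--                 for j in reversed(nbrs):
--                     stack.append((path + [j], visited | {j}))
--     return chains
-- ===== Notes on version B (the rewrite author's own statement) =====
-- stated objective: alternative
-- what changed: B builds an inverted index value->consumer-indices in one pass, derives each dict's sorted successor list from it, and enumerates the maximal chains with an explicit-stack iterative loop over index paths (mapping indices to dicts only when a chain is emitted), instead of A's recursive DFS that rebuilds and intersects the two value sets for every candidate at every node.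
import Mathlib
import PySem

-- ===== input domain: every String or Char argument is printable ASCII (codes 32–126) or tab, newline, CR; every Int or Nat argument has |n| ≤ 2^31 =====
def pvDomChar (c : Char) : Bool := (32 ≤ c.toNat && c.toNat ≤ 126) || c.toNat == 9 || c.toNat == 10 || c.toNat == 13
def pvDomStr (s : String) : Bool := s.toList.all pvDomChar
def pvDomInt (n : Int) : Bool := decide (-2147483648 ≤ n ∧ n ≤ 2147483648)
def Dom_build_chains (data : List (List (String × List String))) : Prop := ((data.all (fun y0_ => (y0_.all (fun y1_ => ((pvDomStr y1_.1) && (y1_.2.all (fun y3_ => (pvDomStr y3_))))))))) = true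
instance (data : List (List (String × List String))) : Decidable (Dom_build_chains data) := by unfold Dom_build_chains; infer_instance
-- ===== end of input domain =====

-- B replaces A's recursive DFS (which re-intersects the two value sets for every
-- candidate at every node) by an inverted index value->consumers from which the
-- successor lists are built once, and an explicit-stack iterative loop over index
-- paths that emits a chain's dicts only when it is maximal (alternative algorithm;
-- equal return value).


-- ===== PORT A =====
-- Comments that tie the port to Source A's lines:
--   pvGetKey d k       = d.get(k, [])               (a Python dict is the association list)
--   pvOverlapA o i     = bool(set(o) & set(i))      (nonempty intersection is truthy)
--   pvDfsA             = the inner `def dfs(path, visited)`; it returns the chains it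
--                        appends, in append order — the for-loop over index_map.items()
--                        is the foldl over enumerate(data) carrying (chains, extended).
--                        fuel = len(data) bounds the recursion depth exactly: visited
--                        grows by one distinct index < len(data) per level.
def pvGetKey (d : List (String × List String)) (k : String) : List String :=
  PySem.Dict.getD (PySem.Dict.mk d) k []
def pvOverlapA (o i : List String) : Bool :=
  !(PySem.Set.inter (PySem.Set.ofList o) (PySem.Set.ofList i)).isEmpty
def pvDfsA (data : List (List (String × List String))) :
    Nat → List (List (String × List String)) → PySem.Set Int →
    List (List (List (String × List String)))
  | 0, _, _ => []
  | fuel+1, path, visited =>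
      let last := path.getLastD []
      let r := (PySem.List.enumerate data).foldl
        (fun (s : List (List (List (String × List String))) × Bool) ic =>
          if visited.contains ic.1 then s
          else if pvOverlapA (pvGetKey last "out_list") (pvGetKey ic.2 "in_list") then
            (s.1 ++ pvDfsA data fuel (path ++ [ic.2])
                      (PySem.Set.union visited (PySem.Set.ofList [ic.1])), true)
          else s)
        ([], false)
      if r.2 then r.1 else r.1 ++ [path]

def build_chains (data : List (List (String × List String))) :
    List (List (List (String × List String))) :=
  (PySem.List.pyRange 0 data.length).foldl
    (fun chains i =>
      chains ++ pvDfsA data data.length [PySem.List.pyGetD data i []] (PySem.Set.ofList [i]))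
    []

-- ===== PORT B =====
-- pvConsumers is Source B's `consumers` dict (value -> ascending list of consumer
-- indices; setdefault(x, []).append(j) is Dict.modify x [] (· ++ [j])); pvAdjB is
-- Source B's `adj` comprehension (sorted set of gathered consumers); pvLoop is Source B's
-- `while stack` loop — the Lean fuel (n+1)^(n+1) is a totality guard only, proved
-- never to run out (the loop pops at most that many frames).
def pvConsumers (data : List (List (String × List String))) : PySem.Dict String (List Int) :=
  (PySem.List.enumerate data).foldl
    (fun c jd => (pvGetKey jd.2 "in_list").foldl
      (fun c x => PySem.Dict.modify c x [] (fun js => js ++ [jd.1])) c)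
    PySem.Dict.empty

def pvAdjB (data : List (List (String × List String))) : List (List Int) :=
  let c := pvConsumers data
  data.map (fun d => PySem.List.sorted
    (PySem.Set.ofList ((pvGetKey d "out_list").flatMap (fun x => PySem.Dict.getD c x [])))
    (fun j => j) false)

def pvLoop (data : List (List (String × List String))) (adj : List (List Int)) :
    Nat → List (List Int × PySem.Set Int) → List (List (List (String × List String))) →
    List (List (List (String × List String)))
  | _, [], chains => chains
  | 0, _ :: _, chains => chains
  | fuel+1, (path, visited) :: rest, chains =>
      let nbrs := (PySem.List.pyGetD adj (path.getLastD (-1)) []).filter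
        (fun j => !visited.contains j)
      if nbrs.isEmpty then
        pvLoop data adj fuel rest (chains ++ [path.map (fun k => PySem.List.pyGetD data k [])])
      else
        pvLoop data adj fuel
          (nbrs.map (fun j => (path ++ [j], PySem.Set.union visited (PySem.Set.ofList [j]))) ++ rest)
          chains

def build_chains_alt (data : List (List (String × List String))) :
    List (List (List (String × List String))) :=
  let adj := pvAdjB data
  (PySem.List.pyRange 0 data.length).foldl
    (fun chains i =>
      pvLoop data adj ((data.length + 1) ^ (data.length + 1))
        [([i], PySem.Set.ofList [i])] chains)
    []

-- ===== PRECONDITION & SPEC =====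
def Spec_build_chains (data : List (List (String × List String))) (out : List (List (List (String × List String)))) : Prop := out = build_chains_alt data
instance (data : List (List (String × List String))) (out : List (List (List (String × List String)))) : Decidable (Spec_build_chains data out) := by unfold Spec_build_chains; infer_instance

-- ===== CLAIM (what is proved, stated in full; the proofs are below) =====
def Claim_equal_build_chains : Prop := ∀ (data : List (List (String × List String))), Dom_build_chains data → Spec_build_chains data (build_chains data)

-- ===== LEMMAS AND PROOFS =====

-- recursive specification of the DFS over the adjacency rows; both ports reduce to it
def pvChains (data : List (List (String × List String))) (adj : List (List Int)) :
    Nat → List Int → PySem.Set Int → List (List (List (String × List String)))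
  | 0, _, _ => []
  | fuel+1, path, visited =>
      let nbrs := (PySem.List.pyGetD adj (path.getLastD (-1)) []).filter
        (fun j => !visited.contains j)
      if nbrs.isEmpty then [path.map (fun k => PySem.List.pyGetD data k [])]
      else nbrs.flatMap
        (fun j => pvChains data adj fuel (path ++ [j])
                    (PySem.Set.union visited (PySem.Set.ofList [j])))

lemma overlap_eq_any (o i : List String) :
    pvOverlapA o i = o.any (fun x => PySem.Set.contains (PySem.Set.ofList i) x) := by
  rw [Bool.eq_iff_iff]
  simp [pvOverlapA, PySem.Set.inter, PySem.Set.contains, List.filter_eq_nil_iff,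
        List.any_eq_true, PySem.Set.mem_ofList]

lemma foldA_shape {D R : Type} (l : List (Int × D)) (C1 : Int → Bool) (C2 : Int × D → Bool)
    (G : Int × D → List R) (acc : List R) (b : Bool) :
    (l.foldl (fun (s : List R × Bool) ic =>
        if C1 ic.1 then s
        else if C2 ic then (s.1 ++ G ic, true) else s) (acc, b))
      = (acc ++ (l.filter (fun ic => !C1 ic.1 && C2 ic)).flatMap G,
         b || !(l.filter (fun ic => !C1 ic.1 && C2 ic)).isEmpty) := by
  induction l generalizing acc b with
  | nil => simp
  | cons h t ih =>
      by_cases h1 : C1 h.1 = true <;> by_cases h2 : C2 h = true <;> simp [h1, h2, ih]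

-- membership in the inverted index built by pvConsumers' loops
lemma mem_consumers_aux (xs : List (List (String × List String))) :
    ∀ (s : Int) (c : PySem.Dict String (List Int)) (x : String) (j : Int),
      (j ∈ ((PySem.List.enumerate xs s).foldl
        (fun c jd => (pvGetKey jd.2 "in_list").foldl
          (fun c x => PySem.Dict.modify c x [] (fun js => js ++ [jd.1])) c) c).getD x [])
      ↔ j ∈ c.getD x [] ∨ ∃ (k : Nat) (hk : k < xs.length),
          j = s + k ∧ x ∈ pvGetKey (xs[k]'hk) "in_list" := by
  induction xs with
  | nil => intro s c x j; simp [PySem.List.enumerate_nil]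
  | cons y ys ih =>
      intro s c x j
      rw [PySem.List.enumerate_cons, List.foldl_cons, ih]
      have hinner : ∀ (c : PySem.Dict String (List Int)),
          ((pvGetKey y "in_list").foldl
            (fun c z => PySem.Dict.modify c z [] (fun js => js ++ [s])) c).getD x []
          = c.getD x [] ++ (((pvGetKey y "in_list").map (fun z => (z, s))).filter
              (fun p => p.1 == x)).map (·.2) := by
        intro c
        have h0 : (pvGetKey y "in_list").foldl
            (fun c z => PySem.Dict.modify c z [] (fun js => js ++ [s])) c
            = ((pvGetKey y "in_list").map (fun z => (z, s))).foldl
              (fun c p => PySem.Dict.modify c p.1 [] (fun js => js ++ [p.2])) c := by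
          rw [List.foldl_map]
        rw [h0]
        exact PySem.Dict.getD_foldl_modify_append _ _ _
      rw [hinner]
      simp only [List.mem_append, List.mem_map, List.mem_filter]
      constructor
      · rintro ((h | h) | ⟨k, hk, rfl, hx⟩)
        · exact Or.inl h
        · obtain ⟨p, ⟨⟨z, hz, rfl⟩, hpx⟩, rfl⟩ := h
          refine Or.inr ⟨0, by simp, by simp, ?_⟩
          simp only [beq_iff_eq] at hpx
          simpa [hpx] using hz
        · refine Or.inr ⟨k + 1, by simp only [List.length_cons]; omega, by push_cast; ring, by simpa using hx⟩
      · rintro (h | ⟨k, hk, rfl, hx⟩)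
        · exact Or.inl (Or.inl h)
        · cases k with
          | zero => exact Or.inl (Or.inr ⟨(x, s), ⟨⟨x, by simpa using hx, rfl⟩, by simp⟩, by simp⟩)
          | succ k =>
              refine Or.inr ⟨k, by simp only [List.length_cons] at hk; omega, by push_cast; ring, by simpa using hx⟩

-- the adjacency row B builds is exactly A's candidate test filtered over range(n)
lemma adj_row (data : List (List (String × List String))) (k0 : Int)
    (h0 : 0 ≤ k0) (hn : k0 < (data.length : Int)) :
    PySem.List.pyGetD (pvAdjB data) k0 []
      = (PySem.List.pyRange 0 (data.length : Int)).filter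
          (fun j => pvOverlapA (pvGetKey (PySem.List.pyGetD data k0 []) "out_list")
                               (pvGetKey (PySem.List.pyGetD data j []) "in_list")) := by
  have hk0t : k0.toNat < data.length := by omega
  rw [PySem.List.pyGetD_eq_getElem (pvAdjB data) [] h0 (by simp [pvAdjB]; omega)]
  rw [PySem.List.pyGetD_eq_getElem data [] h0 (by omega)]
  show (pvAdjB data)[k0.toNat]'(by simp [pvAdjB]; omega) = _
  simp only [pvAdjB, List.getElem_map]
  refine PySem.List.sorted_eq_of_perm_of_pairwise_lt _ _ (fun j => j) ?_ ?_
  · -- the filtered range is a permutation of the gathered set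
    rw [List.perm_ext_iff_of_nodup (List.Nodup.filter _ (PySem.List.nodup_pyRange_one 0 _))
      (PySem.Set.nodup_ofList _)]
    intro a
    rw [List.mem_filter, PySem.List.mem_pyRange_one, PySem.Set.mem_ofList, List.mem_flatMap]
    constructor
    · rintro ⟨⟨ha0, han⟩, hov⟩
      rw [overlap_eq_any, List.any_eq_true] at hov
      obtain ⟨x, hx, hxc⟩ := hov
      refine ⟨x, hx, ?_⟩
      rw [pvConsumers, mem_consumers_aux]
      refine Or.inr ⟨a.toNat, by omega, by omega, ?_⟩
      rw [PySem.Set.contains_iff, PySem.Set.mem_ofList] at hxc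
      rwa [PySem.List.pyGetD_eq_getElem data [] ha0 (by omega)] at hxc
    · rintro ⟨x, hx, hmem⟩
      rw [pvConsumers, mem_consumers_aux] at hmem
      rcases hmem with h | ⟨k, hk, rfl, hxin⟩
      · rw [PySem.Dict.getD_empty] at h; simp at h
      · refine ⟨⟨by omega, by omega⟩, ?_⟩
        rw [overlap_eq_any, List.any_eq_true]
        refine ⟨x, hx, ?_⟩
        rw [PySem.Set.contains_iff, PySem.Set.mem_ofList,
          PySem.List.pyGetD_eq_getElem data [] (by omega) (by simpa using hk)]
        simpa using hxin
  · exact List.Pairwise.filter _ (PySem.List.pairwise_lt_pyRange_one 0 _)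

-- A's recursive dfs equals the spec recursion over B's adjacency rows
lemma dfs_eq (data : List (List (String × List String))) :
    ∀ (fuel : Nat) (pathI : List Int) (visited : PySem.Set Int),
      pathI ≠ [] → (∀ k ∈ pathI, 0 ≤ k ∧ k < (data.length : Int)) →
      pvDfsA data fuel (pathI.map (fun k => PySem.List.pyGetD data k [])) visited
        = pvChains data (pvAdjB data) fuel pathI visited := by
  intro fuel
  induction fuel with
  | zero => intro pathI visited _ _; rfl
  | succ fuel ih =>
    intro pathI visited hne hbnd
    rcases (List.eq_nil_or_concat pathI) with h | ⟨l, k0, rfl⟩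
    · exact absurd h hne
    obtain ⟨hk00, hk0n⟩ := hbnd k0 (by simp)
    have hlastA : ((l ++ [k0]).map (fun k => PySem.List.pyGetD data k [])).getLastD []
        = PySem.List.pyGetD data k0 [] := by simp
    have hlastB : (l ++ [k0]).getLastD (-1) = k0 := by simp
    simp only [pvDfsA, pvChains, List.concat_eq_append]
    rw [hlastA, hlastB, adj_row data k0 hk00 hk0n, List.filter_filter]
    rw [foldA_shape]
    have HF : (PySem.List.enumerate data).filter
        (fun ic => !visited.contains ic.1 &&
          pvOverlapA (pvGetKey (PySem.List.pyGetD data k0 []) "out_list") (pvGetKey ic.2 "in_list"))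
        = ((PySem.List.pyRange 0 (data.length : Int)).filter
            (fun j => !visited.contains j &&
              pvOverlapA (pvGetKey (PySem.List.pyGetD data k0 []) "out_list")
                         (pvGetKey (PySem.List.pyGetD data j []) "in_list"))).map
            (fun j => (j, PySem.List.pyGetD data j [])) := by
      rw [PySem.List.enumerate_eq_map_pyRange data [], List.filter_map]
      simp only [PySem.List.len_eq]
      rfl
    rw [HF, List.isEmpty_map, List.flatMap_map]
    by_cases hemp : ((PySem.List.pyRange 0 (data.length : Int)).filter
        (fun j => !visited.contains j &&
          pvOverlapA (pvGetKey (PySem.List.pyGetD data k0 []) "out_list")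
                     (pvGetKey (PySem.List.pyGetD data j []) "in_list"))).isEmpty
    · rw [List.isEmpty_iff.mp hemp]; simp
    · simp only [hemp, Bool.false_or, Bool.not_false, if_true, List.nil_append]
      refine List.flatMap_congr ?_
      intro j hj
      have hjb := PySem.List.mem_pyRange_one.mp (List.mem_filter.mp hj).1
      have := ih (l ++ [k0] ++ [j]) (visited.union (PySem.Set.ofList [j]))
        (by simp) ?_
      · rw [← this]
        simp
      · intro k hk
        simp only [List.mem_append, List.mem_singleton] at hk
        rcases hk with (hk | hk) | hk
        · exact hbnd k (by simp [hk])
        · exact hbnd k (by simp [hk])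
        · subst hk; exact hjb

-- validity of a stack frame and the fuel potential of a stack
def pvValid (n : Nat) (fr : List Int × PySem.Set Int) : Prop :=
  fr.1 ≠ [] ∧ fr.1.Nodup ∧ (∀ k ∈ fr.1, 0 ≤ k ∧ k < (n : Int)) ∧
    (∀ k ∈ fr.1, fr.2.contains k = true)

def pvCost (n : Nat) (stack : List (List Int × PySem.Set Int)) : Nat :=
  (stack.map (fun fr => (n + 1) ^ (n + 1 - fr.1.length))).sum

lemma valid_len_le (n : Nat) (fr : List Int × PySem.Set Int) (h : pvValid n fr) :
    fr.1.length ≤ n := by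
  obtain ⟨-, hnd, hb, -⟩ := h
  have hsub : fr.1 ⊆ PySem.List.pyRange 0 (n : Int) := by
    intro k hk
    exact PySem.List.mem_pyRange_one.mpr (by simpa using hb k hk)
  have := (List.subperm_of_subset hnd hsub).length_le
  simpa [PySem.List.length_pyRange_one] using this

-- B's explicit-stack loop drains the stack into the spec recursion's chains
lemma loop_eq (data : List (List (String × List String))) :
    ∀ (fuel : Nat) (stack : List (List Int × PySem.Set Int))
      (chains : List (List (List (String × List String)))),
      (∀ fr ∈ stack, pvValid data.length fr) →
      pvCost data.length stack ≤ fuel →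
      pvLoop data (pvAdjB data) fuel stack chains
        = chains ++ stack.flatMap
            (fun fr => pvChains data (pvAdjB data) (data.length + 1 - fr.1.length) fr.1 fr.2) := by
  intro fuel
  induction fuel with
  | zero =>
      intro stack chains hv hc
      cases stack with
      | nil => simp [pvLoop]
      | cons fr rest =>
          exfalso
          have : 0 < (data.length + 1) ^ (data.length + 1 - fr.1.length) :=
            Nat.pow_pos (by omega)
          simp only [pvCost, List.map_cons, List.sum_cons, Nat.le_zero] at hc
          omega
  | succ fuel ih =>
      intro stack chains hv hc
      cases stack with
      | nil => simp [pvLoop]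
      | cons fr rest =>
          obtain ⟨p, v⟩ := fr
          have hval := hv _ (List.mem_cons_self ..)
          obtain ⟨hpne, hpnd, hpb, hpv⟩ := hval
          have hple : p.length ≤ data.length := valid_len_le _ _ (hv _ (List.mem_cons_self ..))
          -- the last element of p is a legal row index
          rcases List.eq_nil_or_concat p with rfl | ⟨l, k0, rfl⟩
          · exact absurd rfl hpne
          simp only [List.concat_eq_append] at hv hc hpne hpnd hpb hpv hple ⊢
          have hexp : data.length + 1 - (l ++ [k0]).length
              = (data.length - (l ++ [k0]).length) + 1 := by omega
          obtain ⟨hk00, hk0n⟩ := hpb k0 (by simp)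
          have hlast : (l ++ [k0]).getLastD (-1) = k0 := by simp
          have hrow := adj_row data k0 hk00 hk0n
          simp only [pvLoop, hlast]
          set nbrs := (PySem.List.pyGetD (pvAdjB data) k0 []).filter
            (fun j => !v.contains j) with hnbrs
          have hKpos : 0 < (data.length + 1) ^ (data.length - (l ++ [k0]).length) :=
            Nat.pow_pos (by omega)
          have hcost1 : pvCost data.length ((l ++ [k0], v) :: rest)
              = (data.length + 1) ^ (data.length - (l ++ [k0]).length + 1)
                + pvCost data.length rest := by
            simp only [pvCost, List.map_cons, List.sum_cons]
            rw [hexp]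
          by_cases hemp : nbrs.isEmpty
          · rw [if_pos hemp]
            rw [ih rest _ (fun fr hfr => hv fr (List.mem_cons_of_mem _ hfr)) ?_]
            · have hchain : pvChains data (pvAdjB data)
                  (data.length - l.length) (l ++ [k0]) v
                  = [(l ++ [k0]).map (fun k => PySem.List.pyGetD data k [])] := by
                have he : data.length - l.length
                    = (data.length - (l ++ [k0]).length) + 1 := by
                  simp only [List.length_append, List.length_cons, List.length_nil] at hple ⊢
                  omega
                rw [he]
                simp only [pvChains, hlast, ← hnbrs, hemp, if_true]
              simp [hchain]
            · rw [hcost1] at hc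
              have : 0 < (data.length + 1) ^ (data.length - (l ++ [k0]).length + 1) :=
                Nat.pow_pos (by omega)
              omega
          · rw [if_neg hemp]
            -- the path is not yet full: some legal index is unvisited
            have hnbr_mem : ∀ j ∈ nbrs, (0 ≤ j ∧ j < (data.length : Int)) ∧ v.contains j = false := by
              intro j hj
              rw [hnbrs, List.mem_filter, hrow, List.mem_filter] at hj
              obtain ⟨⟨hjr, -⟩, hjv⟩ := hj
              exact ⟨by simpa using PySem.List.mem_pyRange_one.mp hjr, by simpa using hjv⟩
            have hplen : (l ++ [k0]).length < data.length := by
              rcases Nat.lt_or_ge (l ++ [k0]).length data.length with h | h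
              · exact h
              · exfalso
                have hlen : (l ++ [k0]).length = data.length := by omega
                obtain ⟨j, hj⟩ := List.exists_mem_of_ne_nil nbrs (by
                  intro h; rw [h] at hemp; simp at hemp)
                obtain ⟨hjb, hjv⟩ := hnbr_mem j hj
                have hsub : l ++ [k0] ⊆ PySem.List.pyRange 0 (data.length : Int) := by
                  intro k hk
                  exact PySem.List.mem_pyRange_one.mpr (by simpa using hpb k hk)
                have hperm : (l ++ [k0]).Perm (PySem.List.pyRange 0 (data.length : Int)) := by
                  refine (List.subperm_of_subset hpnd hsub).perm_of_length_le ?_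
                  simp [PySem.List.length_pyRange_one, hlen]
                have hjmem : j ∈ l ++ [k0] :=
                  hperm.mem_iff.mpr (PySem.List.mem_pyRange_one.mpr (by omega))
                rw [hpv j hjmem] at hjv
                exact absurd hjv (by simp)
            -- children are valid frames
            have hchild : ∀ fr ∈ nbrs.map (fun j =>
                (l ++ [k0] ++ [j], PySem.Set.union v (PySem.Set.ofList [j]))) ++ rest,
                pvValid data.length fr := by
              intro fr hfr
              rcases List.mem_append.mp hfr with hfr | hfr
              · obtain ⟨j, hj, rfl⟩ := List.mem_map.mp hfr
                obtain ⟨hjb, hjv⟩ := hnbr_mem j hj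
                have hjnp : j ∉ l ++ [k0] := by
                  intro hmem
                  rw [hpv j hmem] at hjv; exact absurd hjv (by simp)
                refine ⟨by simp, ?_, ?_, ?_⟩
                · simpa [List.nodup_append] using
                    (by simpa [List.nodup_append] using hpnd : (l ++ [k0]).Nodup).append
                      (List.nodup_singleton j)
                      (by simpa [List.disjoint_singleton] using hjnp)
                · intro k hk
                  rcases List.mem_append.mp hk with hk | hk
                  · exact hpb k hk
                  · simp only [List.mem_singleton] at hk; subst hk; exact hjb
                · intro k hk
                  rw [PySem.Set.contains_iff, PySem.Set.mem_union]
                  rcases List.mem_append.mp hk with hk | hk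
                  · exact Or.inl ((PySem.Set.contains_iff _ _).mp (hpv k hk))
                  · simp only [List.mem_singleton] at hk; subst hk
                    exact Or.inr (by simp [PySem.Set.mem_ofList])
              · exact hv fr (List.mem_cons_of_mem _ hfr)
            -- fuel accounting
            have hnlen : nbrs.length ≤ data.length := by
              have h1 : nbrs.length ≤ (PySem.List.pyGetD (pvAdjB data) k0 []).length :=
                List.length_filter_le _ _
              have h2 : ((PySem.List.pyRange 0 (data.length : Int)).filter
                  (fun j => pvOverlapA (pvGetKey (PySem.List.pyGetD data k0 []) "out_list")
                    (pvGetKey (PySem.List.pyGetD data j []) "in_list"))).length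
                  ≤ (PySem.List.pyRange 0 (data.length : Int)).length :=
                List.length_filter_le _ _
              rw [hrow] at h1
              simp only [PySem.List.length_pyRange_one] at h2
              omega
            have hcost2 : pvCost data.length
                (nbrs.map (fun j => (l ++ [k0] ++ [j],
                  PySem.Set.union v (PySem.Set.ofList [j]))) ++ rest)
                ≤ fuel := by
              have hmap : (nbrs.map (fun j => (l ++ [k0] ++ [j],
                    PySem.Set.union v (PySem.Set.ofList [j])))).map
                    (fun fr => (data.length + 1) ^ (data.length + 1 - fr.1.length))
                  = nbrs.map (fun _ =>
                    (data.length + 1) ^ (data.length - (l ++ [k0]).length)) := by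
                rw [List.map_map]
                refine List.map_congr_left ?_
                intro j _
                simp only [Function.comp]
                congr 1
                simp only [List.length_append, List.length_cons, List.length_nil]
                omega
              rw [hcost1] at hc
              have hsum : pvCost data.length
                  (nbrs.map (fun j => (l ++ [k0] ++ [j],
                    PySem.Set.union v (PySem.Set.ofList [j]))) ++ rest)
                  = nbrs.length * (data.length + 1) ^ (data.length - (l ++ [k0]).length)
                    + pvCost data.length rest := by
                simp only [pvCost, List.map_append, List.sum_append, hmap]
                congr 1
                simp [mul_comm]
              rw [hsum]
              set K := (data.length + 1) ^ (data.length - (l ++ [k0]).length) with hK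
              have hpow : (data.length + 1) ^ (data.length - (l ++ [k0]).length + 1)
                  = (data.length + 1) * K := by rw [hK, pow_succ]; ring
              rw [hpow] at hc
              have hmul : nbrs.length * K ≤ data.length * K :=
                Nat.mul_le_mul_right _ hnlen
              have hdist : (data.length + 1) * K = data.length * K + K := by ring
              rw [hdist] at hc
              omega
            have hchains : pvChains data (pvAdjB data)
                (data.length + 1 - (l ++ [k0]).length) (l ++ [k0]) v
                = nbrs.flatMap (fun j => pvChains data (pvAdjB data)
                    (data.length - (l ++ [k0]).length) (l ++ [k0] ++ [j])
                    (PySem.Set.union v (PySem.Set.ofList [j]))) := by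
              have hemp' : nbrs.isEmpty = false := by simpa using hemp
              rw [hexp]
              simp only [pvChains, hlast, ← hnbrs, hemp', Bool.false_eq_true, if_false]
            rw [ih _ _ hchild hcost2]
            congr 1
            rw [List.flatMap_append, List.flatMap_map, List.flatMap_cons]
            congr 1
            rw [hchains]
            refine List.flatMap_congr ?_
            intro j hj
            congr 1
            simp only [List.length_append, List.length_cons, List.length_nil]
            omega
-- ===== VERDICT (by name: the statement is the Claim_ definition above) =====
theorem build_chains_spec : Claim_equal_build_chains := by
  intro data _
  unfold Spec_build_chains build_chains build_chains_alt
  refine PySem.List.foldl_congr_mem _ _ _ _ ?_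
  intro acc i hi
  obtain ⟨hi0, hin⟩ := PySem.List.mem_pyRange_one.mp hi
  have hloop := loop_eq data ((data.length + 1) ^ (data.length + 1))
    [([i], PySem.Set.ofList [i])] acc ?_ ?_
  · rw [hloop]
    have h := dfs_eq data data.length [i] (PySem.Set.ofList [i]) (by simp)
      (by intro k hk; simp only [List.mem_singleton] at hk; subst hk; exact ⟨hi0, hin⟩)
    simp only [List.map_cons, List.map_nil] at h
    simp only [List.flatMap_cons, List.flatMap_nil, List.append_nil, List.length_cons,
      List.length_nil]
    rw [h]
    norm_num
  · intro fr hfr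
    simp only [List.mem_singleton] at hfr
    subst hfr
    refine ⟨by simp, by simp, ?_, ?_⟩
    · intro k hk; simp only [List.mem_singleton] at hk; subst hk; exact ⟨hi0, hin⟩
    · intro k hk; simp only [List.mem_singleton] at hk; subst hk
      rw [PySem.Set.contains_iff, PySem.Set.mem_ofList]; simp
  · simp only [pvCost, List.map_cons, List.map_nil, List.sum_cons, List.sum_nil,
      List.length_cons, List.length_nil, Nat.add_zero]
    exact Nat.pow_le_pow_right (by omega) (by omega)
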